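-- pv_equiv track=rewrite | github.com/cloudemsNL/ha-cloudems | custom_components/cloudems/energy/prices.py | _find_cheapest_window_indices
-- ===== SOURCE A (Python) =====
-- def _find_cheapest_window_indices(hours: list, window: int) -> set:
--     """Geef de INDEX-set van het goedkoopste blok — voor in_cheapest_Nh check."""
--     if len(hours) < window:
--         return set()
--     best_cost = float("inf")
--     best_idx  = 0
--     for i in range(len(hours) - window + 1):
--         cost = sum(hours[j].get("price", 0) for j in range(i, i + window))
--         if cost < best_cost:
--             best_cost = cost
--             best_idx  = i
--     return set(range(best_idx, best_idx + window))
-- ===== SOURCE B (Python) =====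
-- def _find_cheapest_window_indices(hours: list, window: int) -> set:
--     """Sliding-window running sum: one pass, no inner per-window loop."""
--     n = len(hours)
--     if window <= 0 or n < window:
--         return set()
--     prices = [h.get("price", 0) for h in hours]
--     cur = sum(prices[:window])
--     best, best_idx = cur, 0
--     for i in range(1, n - window + 1):
--         cur += prices[i + window - 1] - prices[i - 1]
--         if cur < best:
--             best, best_idx = cur, i
--     return set(range(best_idx, best_idx + window))
-- ===== Notes on version B (the rewrite author's own statement) =====
-- stated objective: alternative
-- what changed: Replaces the per-position recomputation of each window sum (nested loop) with a single sliding-window running sum updated by adding the entering price and subtracting the leaving one; O(n) independent of window size.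
import Mathlib
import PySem

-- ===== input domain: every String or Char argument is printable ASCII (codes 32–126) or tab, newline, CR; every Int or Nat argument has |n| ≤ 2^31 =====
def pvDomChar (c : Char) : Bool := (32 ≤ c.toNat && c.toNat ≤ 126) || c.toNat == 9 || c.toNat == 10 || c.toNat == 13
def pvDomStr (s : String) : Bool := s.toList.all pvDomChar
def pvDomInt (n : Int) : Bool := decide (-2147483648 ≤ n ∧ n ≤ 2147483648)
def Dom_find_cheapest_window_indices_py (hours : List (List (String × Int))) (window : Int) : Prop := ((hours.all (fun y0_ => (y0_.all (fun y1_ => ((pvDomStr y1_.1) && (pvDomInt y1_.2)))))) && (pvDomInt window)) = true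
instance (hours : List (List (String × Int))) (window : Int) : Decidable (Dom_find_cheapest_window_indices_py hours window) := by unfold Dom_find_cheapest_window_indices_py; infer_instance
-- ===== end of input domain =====

-- B replaces A's per-position window-sum recomputation by a sliding running sum (one pass, no inner loop).

-- ===== PORT A =====
-- cost = sum(hours[j].get("price", 0) for j in range(i, i + window))
def pvCostA (hours : List (List (String × Int))) (i window : Int) : Int :=
  (PySem.List.pyRange i (i + window) 1).foldl
    (fun acc j => acc + PySem.Dict.getD (PySem.Dict.mk (PySem.List.pyGetD hours j [])) "price" 0) 0

def find_cheapest_window_indices_py (hours : List (List (String × Int))) (window : Int) : List Int :=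
  if (hours.length : Int) < window then []
  else
    let st := (PySem.List.pyRange 0 ((hours.length : Int) - window + 1) 1).foldl
      (fun (st : Option Int × Int) i =>
        let cost := pvCostA hours i window
        match st.1 with
        | none => (some cost, i)
        | some b => if cost < b then (some cost, i) else st)
      (none, 0)
    PySem.List.pyRange st.2 (st.2 + window) 1

-- ===== PORT B =====
def find_cheapest_window_indices_py_alt (hours : List (List (String × Int))) (window : Int) : List Int :=
  if window ≤ 0 ∨ (hours.length : Int) < window then []
  else
    let prices := hours.map (fun h => PySem.Dict.getD (PySem.Dict.mk h) "price" 0)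
    let cur0 := (PySem.List.slice prices none (some window)).foldl (· + ·) 0
    let st := (PySem.List.pyRange 1 ((hours.length : Int) - window + 1) 1).foldl
      (fun (st : Int × Int × Int) i =>
        let cur := st.1 + PySem.List.pyGetD prices (i + window - 1) 0 - PySem.List.pyGetD prices (i - 1) 0
        if cur < st.2.1 then (cur, cur, i) else (cur, st.2.1, st.2.2))
      (cur0, cur0, 0)
    PySem.List.pyRange st.2.2 (st.2.2 + window) 1

-- ===== PRECONDITION & SPEC =====
def Spec_find_cheapest_window_indices_py (hours : List (List (String × Int))) (window : Int) (out : List Int) : Prop := out = find_cheapest_window_indices_py_alt hours window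
instance (hours : List (List (String × Int))) (window : Int) (out : List Int) : Decidable (Spec_find_cheapest_window_indices_py hours window out) := by unfold Spec_find_cheapest_window_indices_py; infer_instance

-- ===== CLAIM (what is proved, stated in full; the proofs are below) =====
def Claim_equal_find_cheapest_window_indices_py : Prop := ∀ (hours : List (List (String × Int))) (window : Int), Dom_find_cheapest_window_indices_py hours window → Spec_find_cheapest_window_indices_py hours window (find_cheapest_window_indices_py hours window)

-- ===== LEMMAS AND PROOFS =====

-- window-sum reference: sum of prices[i .. i+window)
def pvS (prices : List Int) (window i : Int) : Int :=
  ((PySem.List.pyRange i (i + window) 1).map (fun j => PySem.List.pyGetD prices j 0)).sum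

theorem pvCostA_eq (hours : List (List (String × Int))) (window i : Int) :
    pvCostA hours i window
      = pvS (hours.map (fun h => PySem.Dict.getD (PySem.Dict.mk h) "price" 0)) window i := by
  unfold pvCostA pvS
  rw [PySem.List.foldl_add, zero_add]
  congr 1
  apply List.map_congr_left
  intro j _
  exact (PySem.List.pyGetD_map (fun h => PySem.Dict.getD (PySem.Dict.mk h) "price" 0) hours j []).symm

theorem pvS_slide (prices : List Int) (window i : Int) (hw : 1 ≤ window) :
    pvS prices window (i + 1)
      = pvS prices window i + PySem.List.pyGetD prices (i + window) 0
          - PySem.List.pyGetD prices i 0 := by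
  unfold pvS
  rw [show i + 1 + window = (i + window) + 1 by ring,
      PySem.List.pyRange_one_succ_right (by omega : i + 1 ≤ i + window),
      PySem.List.pyRange_one_cons (by omega : i < i + window)]
  simp only [List.map_append, List.map_cons, List.sum_append, List.sum_cons, List.map_nil,
    List.sum_nil]
  ring

theorem pvTake_eq (xs : List Int) (w : Int) (_h0 : 0 ≤ w) (hlen : w ≤ (xs.length : Int)) :
    (PySem.List.pyRange 0 w 1).map (fun j => PySem.List.pyGetD xs j 0) = xs.take w.toNat := by
  apply List.ext_getElem
  · simp [PySem.List.length_pyRange_one]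
    omega
  · intro k h1 h2
    have hk : k < w.toNat := by
      simpa [PySem.List.length_pyRange_one] using h1
    have hkx : k < xs.length := by omega
    simp only [List.getElem_map, PySem.List.getElem_pyRange_one, List.getElem_take, zero_add]
    rw [show ((k : Int)) = ((k : Nat) : Int) from rfl, PySem.List.pyGetD_natCast]
    exact List.getD_eq_getElem xs 0 hkx

-- A's scan (Option accumulator, started on some) equals the plain argmin scan
theorem pvFoldA (c : Int → Int) (L : List Int) (b bi : Int) :
    (L.foldl (fun (st : Option Int × Int) i =>
        let cost := c i
        match st.1 with
        | none => (some cost, i)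
        | some bb => if cost < bb then (some cost, i) else st) (some b, bi))
      = (some ((L.foldl (fun (st : Int × Int) i =>
            if c i < st.1 then (c i, i) else st) (b, bi)).1),
         (L.foldl (fun (st : Int × Int) i =>
            if c i < st.1 then (c i, i) else st) (b, bi)).2) := by
  induction L generalizing b bi with
  | nil => rfl
  | cons x t ih =>
      simp only [List.foldl_cons]
      by_cases h : c x < b
      · simp only [h, if_pos]
        exact ih (c x) x
      · simp only [h, if_false]
        exact ih b bi

-- B's sliding scan carries cur = S (i-1) as an invariant; its best/idx part is the argmin scan
theorem pvFoldB (p S : Int → Int) (w : Int)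
    (hslide : ∀ i, S (i + 1) = S i + p (i + w) - p i) :
    ∀ (N : Nat) (a b best bi : Int), (b - a).toNat = N →
    ((PySem.List.pyRange a b 1).foldl
        (fun (st : Int × Int × Int) i =>
          let cur := st.1 + p (i + w - 1) - p (i - 1)
          if cur < st.2.1 then (cur, cur, i) else (cur, st.2.1, st.2.2))
        (S (a - 1), best, bi)).2
      = (PySem.List.pyRange a b 1).foldl
          (fun (st : Int × Int) i => if S i < st.1 then (S i, i) else st) (best, bi) := by
  intro N
  induction N with
  | zero =>
      intro a b best bi h
      rw [PySem.List.pyRange_one_eq_nil (by omega)]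
      rfl
  | succ n ih =>
      intro a b best bi h
      rw [PySem.List.pyRange_one_cons (by omega : a < b)]
      simp only [List.foldl_cons]
      have hc : S (a - 1) + p (a + w - 1) - p (a - 1) = S a := by
        have hs := hslide (a - 1)
        rw [show a - 1 + 1 = a by ring, show a - 1 + w = a + w - 1 by ring] at hs
        omega
      simp only [hc]
      have h1 : (b - (a + 1)).toNat = n := by omega
      by_cases hlt : S a < best
      · rw [if_pos hlt, if_pos hlt]
        have hrec := ih (a + 1) b (S a) a h1
        rw [show (a : Int) + 1 - 1 = a by ring] at hrec
        exact hrec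
      · rw [if_neg hlt, if_neg hlt]
        have hrec := ih (a + 1) b best bi h1
        rw [show (a : Int) + 1 - 1 = a by ring] at hrec
        exact hrec

-- ===== VERDICT (by name: the statement is the Claim_ definition above) =====
theorem find_cheapest_window_indices_py_spec : Claim_equal_find_cheapest_window_indices_py := by
  intro hours window _dom
  unfold Spec_find_cheapest_window_indices_py
  unfold find_cheapest_window_indices_py find_cheapest_window_indices_py_alt
  by_cases hsmall : (hours.length : Int) < window
  · simp [hsmall]
  · by_cases hw0 : window ≤ 0
    · -- degenerate window: A's returned range is empty, B returns [] directly
      simp only [hsmall, if_false, hw0, true_or, if_pos]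
      exact PySem.List.pyRange_one_eq_nil (by omega)
    · -- main case: 1 ≤ window ≤ len
      have hw1 : 1 ≤ window := by omega
      have hlen : window ≤ (hours.length : Int) := by omega
      simp only [hsmall, hw0, false_or, if_false]
      set prices := hours.map (fun h => PySem.Dict.getD (PySem.Dict.mk h) "price" 0) with hprices
      have hplen : (prices.length : Int) = (hours.length : Int) := by simp [hprices]
      set p : Int → Int := fun j => PySem.List.pyGetD prices j 0 with hp
      set S : Int → Int := fun i => pvS prices window i with hS
      -- cur0 = S 0
      have hcur0 : (PySem.List.slice prices none (some window)).foldl (· + ·) 0 = S 0 := by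
        rw [PySem.List.slice_to prices (by omega : (0:Int) ≤ window)]
        rw [← List.sum_eq_foldl, ← pvTake_eq prices window (by omega) (by omega)]
        simp [hS, pvS]
      -- A's fold
      simp only [pvCostA_eq, ← hprices, ← hS]
      have hm : (0:Int) < (hours.length : Int) - window + 1 := by omega
      rw [PySem.List.pyRange_one_cons hm]
      simp only [List.foldl_cons]
      -- first iteration from (none, 0) yields (some (S 0), 0)
      rw [show (0:Int) + 1 = 1 by ring]
      rw [pvFoldA (fun i => S i) (PySem.List.pyRange 1 ((hours.length : Int) - window + 1) 1) (S 0) 0]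
      -- B's fold
      have hslide : ∀ i, S (i + 1) = S i + p (i + window) - p i := fun i =>
        pvS_slide prices window i hw1
      have hB := pvFoldB p S window hslide
        (((hours.length : Int) - window + 1 - 1).toNat) 1
        ((hours.length : Int) - window + 1) (S 0) 0 rfl
      rw [show S (1 - 1) = S 0 by norm_num] at hB
      rw [hcur0, hB]
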